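-- pv_equiv track=rewrite | github.com/borhen68/phantom | core/skill_catalog.py | _config_requirement_to_capability
-- ===== SOURCE A (Python) =====
-- def _config_requirement_to_capability(config_path: str) -> str:
--     path = str(config_path or "").strip().lower()
--     aliases = {
--         "channels.telegram": "telegram",
--         "channels.whatsapp": "whatsapp",
--         "channels.slack": "slack",
--         "channels.discord": "discord",
--         "channels.bluebubbles": "bluebubbles",
--         "plugins.entries.voice-call.enabled": "voice-call",
--     }
--     for prefix, capability in aliases.items():
--         if path == prefix or path.startswith(prefix + "."):
--             return capability
--     return path.split(".")[-1] if path else ""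
-- ===== SOURCE B (Python) =====
-- _CHANNELS = {"telegram", "whatsapp", "slack", "discord", "bluebubbles"}
--
--
-- def _config_requirement_to_capability(config_path: str) -> str:
--     path = str(config_path or "").strip().lower()
--     segs = path.split(".")
--     if len(segs) >= 2 and segs[0] == "channels" and segs[1] in _CHANNELS:
--         return segs[1]
--     if segs[:4] == ["plugins", "entries", "voice-call", "enabled"]:
--         return "voice-call"
--     return segs[-1] if path else ""
-- ===== Notes on version B (the rewrite author's own statement) =====
-- stated objective: simpler
-- what changed: Replaces A's scan over the alias table (an equality-or-startswith string test per alias entry) by splitting the normalized path into dot-segments once and inspecting the leading segments directly, with the same last-segment fallback.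
import Mathlib
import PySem

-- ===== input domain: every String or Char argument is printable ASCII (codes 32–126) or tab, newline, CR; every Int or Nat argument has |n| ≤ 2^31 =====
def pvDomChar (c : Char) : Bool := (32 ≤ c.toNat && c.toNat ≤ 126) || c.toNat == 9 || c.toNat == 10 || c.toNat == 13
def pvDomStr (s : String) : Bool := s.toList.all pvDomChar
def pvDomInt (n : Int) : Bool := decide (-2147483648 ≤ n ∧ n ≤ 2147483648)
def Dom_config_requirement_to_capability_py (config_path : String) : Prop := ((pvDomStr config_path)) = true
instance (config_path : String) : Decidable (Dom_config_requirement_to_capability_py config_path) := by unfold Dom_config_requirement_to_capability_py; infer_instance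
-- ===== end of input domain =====

-- B replaces A's scan over the alias table (string startswith tests per alias) by splitting the
-- normalized path into dot-segments once and inspecting the segments directly (objective: simpler).

-- ===== PORT A =====
-- the 'for prefix, capability in aliases.items()' loop of A
def pvAScan (path : String) : List (String × String) → Option String
  | [] => none
  | (pre, cap) :: rest =>
      if (path == pre || PySem.Str.startswith path (pre ++ ".")) = true then some cap
      else pvAScan path rest

def config_requirement_to_capability_py (config_path : String) : String :=
  let path := PySem.Str.lower (PySem.Str.strip config_path)
  let aliases : PySem.Dict String String := PySem.Dict.ofList
    [("channels.telegram", "telegram"), ("channels.whatsapp", "whatsapp"),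
     ("channels.slack", "slack"), ("channels.discord", "discord"),
     ("channels.bluebubbles", "bluebubbles"),
     ("plugins.entries.voice-call.enabled", "voice-call")]
  match pvAScan path aliases.items with
  | some cap => cap
  | none =>
      if path ≠ "" then (PySem.List.pyGet? ((PySem.Str.split? path ".").getD []) (-1)).getD ""
      else ""

-- ===== PORT B =====
def config_requirement_to_capability_py_alt (config_path : String) : String :=
  let path := PySem.Str.lower (PySem.Str.strip config_path)
  let segs := (PySem.Str.split? path ".").getD []
  if (decide (2 ≤ segs.length) && ((PySem.List.pyGet? segs 0).getD "" == "channels")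
        && (["telegram", "whatsapp", "slack", "discord", "bluebubbles"].contains
              ((PySem.List.pyGet? segs 1).getD ""))) = true then
    (PySem.List.pyGet? segs 1).getD ""
  else if (PySem.List.slice segs none (some 4)
        == ["plugins", "entries", "voice-call", "enabled"]) = true then
    "voice-call"
  else if path ≠ "" then (PySem.List.pyGet? segs (-1)).getD ""
  else ""

-- ===== PRECONDITION & SPEC =====
def Spec_config_requirement_to_capability_py (config_path : String) (out : String) : Prop := out = config_requirement_to_capability_py_alt config_path
instance (config_path : String) (out : String) : Decidable (Spec_config_requirement_to_capability_py config_path out) := by unfold Spec_config_requirement_to_capability_py; infer_instance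

-- ===== CLAIM (what is proved, stated in full; the proofs are below) =====
def Claim_equal_config_requirement_to_capability_py : Prop := ∀ (config_path : String), Dom_config_requirement_to_capability_py config_path → Spec_config_requirement_to_capability_py config_path (config_requirement_to_capability_py config_path)

-- ===== LEMMAS AND PROOFS =====

-- reference splitter: Python's s.split(".") on a list of characters
def pvSplitDot : List Char → List (List Char)
  | [] => [[]]
  | c :: r => if c = '.' then [] :: pvSplitDot r else (pvSplitDot r).modifyHead (c :: ·)

-- reference joiner: ".".join
def pvJoinDot : List (List Char) → List Char
  | [] => []
  | [x] => x
  | x :: y :: r => x ++ '.' :: pvJoinDot (y :: r)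

theorem pvSplitDot_ne_nil (s : List Char) : pvSplitDot s ≠ [] := by
  induction s with
  | nil => simp [pvSplitDot]
  | cons c r ih =>
      simp only [pvSplitDot]
      split
      · simp
      · cases h : pvSplitDot r with
        | nil => exact absurd h ih
        | cons a t => simp [List.modifyHead]

theorem pvSplitOn_go_eq (fuel : Nat) (l cur : List Char) (accL : List (List Char))
    (h : l.length ≤ fuel) :
    PySem.Chars.splitOn.go ['.'] fuel l cur accL
      = accL.reverse ++ (cur.reverse ++ (pvSplitDot l).headI) :: (pvSplitDot l).tail := by
  induction fuel generalizing l cur accL with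
  | zero =>
      interval_cases hl : l.length
      · rw [List.length_eq_zero_iff.mp hl]
        simp [PySem.Chars.splitOn.go, pvSplitDot]
  | succ fuel ih =>
      cases l with
      | nil => simp [PySem.Chars.splitOn.go, pvSplitDot]
      | cons c rest =>
          by_cases hc : c = '.'
          · subst hc
            have hpre : (['.'] : List Char).isPrefixOf ('.' :: rest) = true := by
              simp [List.isPrefixOf]
            rw [show PySem.Chars.splitOn.go ['.'] (fuel + 1) ('.' :: rest) cur accL
                  = PySem.Chars.splitOn.go ['.'] fuel (List.drop 1 ('.' :: rest)) []
                      (cur.reverse :: accL) by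
              simp [PySem.Chars.splitOn.go, hpre]]
            rw [ih _ _ _ (by simpa using Nat.lt_succ_iff.mp (by simpa using h))]
            obtain ⟨a, t, ht⟩ := List.exists_cons_of_ne_nil (pvSplitDot_ne_nil rest)
            simp [pvSplitDot, ht]
          · have hpre : (['.'] : List Char).isPrefixOf (c :: rest) = false := by
              simp [List.isPrefixOf, Ne.symm hc]
            rw [show PySem.Chars.splitOn.go ['.'] (fuel + 1) (c :: rest) cur accL
                  = PySem.Chars.splitOn.go ['.'] fuel rest (c :: cur) accL by
              simp [PySem.Chars.splitOn.go, hpre]]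
            rw [ih _ _ _ (by simpa using Nat.lt_succ_iff.mp (by simpa using h))]
            obtain ⟨a, t, ht⟩ := List.exists_cons_of_ne_nil (pvSplitDot_ne_nil rest)
            simp [pvSplitDot, ht, hc]

theorem pvSplitOn_dot (s : List Char) : PySem.Chars.splitOn s ['.'] = pvSplitDot s := by
  unfold PySem.Chars.splitOn
  rw [pvSplitOn_go_eq _ _ _ _ (Nat.le_succ _)]
  obtain ⟨a, t, ht⟩ := List.exists_cons_of_ne_nil (pvSplitDot_ne_nil s)
  simp [ht]

theorem pvSplitDot_append (a b : List Char) :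
    pvSplitDot (a ++ '.' :: b) = pvSplitDot a ++ pvSplitDot b := by
  induction a with
  | nil => simp [pvSplitDot]
  | cons c r ih =>
      by_cases hc : c = '.'
      · subst hc; simp [pvSplitDot, ih]
      · obtain ⟨x, t, ht⟩ := List.exists_cons_of_ne_nil (pvSplitDot_ne_nil r)
        simp [pvSplitDot, hc, ih, ht, List.modifyHead]

theorem pvJoinDot_splitDot (s : List Char) : pvJoinDot (pvSplitDot s) = s := by
  induction s with
  | nil => simp [pvSplitDot, pvJoinDot]
  | cons c r ih =>
      obtain ⟨x, t, ht⟩ := List.exists_cons_of_ne_nil (pvSplitDot_ne_nil r)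
      by_cases hc : c = '.'
      · subst hc
        have h1 : pvSplitDot ('.' :: r) = [] :: pvSplitDot r := by simp [pvSplitDot]
        rw [h1, ht]
        simp only [pvJoinDot, List.nil_append]
        rw [← ht, ih]
      · simp only [pvSplitDot, if_neg hc, ht, List.modifyHead]
        cases t with
        | nil => simpa [pvJoinDot, ht] using congrArg (c :: ·) ih
        | cons y u =>
            have h2 : pvJoinDot ((c :: x) :: y :: u) = (c :: x) ++ '.' :: pvJoinDot (y :: u) := by
              simp only [pvJoinDot]
            have h3 : pvJoinDot (x :: y :: u) = x ++ '.' :: pvJoinDot (y :: u) := by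
              simp only [pvJoinDot]
            rw [h2]
            conv_rhs => rw [← ih, ht, h3]
            simp

theorem pvJoinDot_append (a b : List (List Char)) (ha : a ≠ []) (hb : b ≠ []) :
    pvJoinDot (a ++ b) = pvJoinDot a ++ '.' :: pvJoinDot b := by
  induction a with
  | nil => exact absurd rfl ha
  | cons x a ih =>
      obtain ⟨y, t, ht⟩ := List.exists_cons_of_ne_nil hb
      cases a with
      | nil => simp [pvJoinDot, ht]
      | cons z r =>
          have hih : pvJoinDot (z :: r ++ b) = pvJoinDot (z :: r) ++ '.' :: pvJoinDot b :=
            ih (by simp)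
          have e1 : pvJoinDot (x :: (z :: (r ++ b))) = x ++ '.' :: pvJoinDot (z :: (r ++ b)) := by
            simp only [pvJoinDot]
          have e2 : pvJoinDot (x :: z :: r) = x ++ '.' :: pvJoinDot (z :: r) := by
            simp only [pvJoinDot]
          calc pvJoinDot ((x :: z :: r) ++ b)
              = x ++ '.' :: pvJoinDot ((z :: r) ++ b) := by simpa using e1
            _ = x ++ '.' :: (pvJoinDot (z :: r) ++ '.' :: pvJoinDot b) := by
                  simpa using congrArg (fun l => x ++ '.' :: l) hih
            _ = pvJoinDot (x :: z :: r) ++ '.' :: pvJoinDot b := by rw [e2]; simp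

-- the matching relation of A, characterized on segment lists
theorem pvMatch_iff (k p : List Char) :
    (p = k ∨ (k ++ ['.']) <+: p) ↔ pvSplitDot k <+: pvSplitDot p := by
  constructor
  · rintro (rfl | ⟨r, hr⟩)
    · exact List.prefix_refl _
    · have : p = k ++ '.' :: r := by simpa using hr.symm
      subst this
      exact ⟨pvSplitDot r, (pvSplitDot_append k r).symm⟩
  · rintro ⟨t, ht⟩
    rcases eq_or_ne t [] with rfl | htne
    · left
      have := congrArg pvJoinDot ht
      rw [List.append_nil, pvJoinDot_splitDot, pvJoinDot_splitDot] at this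
      exact this.symm
    · right
      have := congrArg pvJoinDot ht
      rw [pvJoinDot_splitDot, pvJoinDot_append _ _ (pvSplitDot_ne_nil k) htne,
        pvJoinDot_splitDot] at this
      exact ⟨pvJoinDot t, by rw [← this]; simp⟩


theorem pvPrefix_map_toList (l xs : List String) :
    l.map String.toList <+: xs.map String.toList ↔ l <+: xs := by
  constructor
  · intro h
    induction l generalizing xs with
    | nil => simp
    | cons a l ih =>
        cases xs with
        | nil => simp at h
        | cons x xs =>
            rw [List.map_cons, List.map_cons, List.cons_prefix_cons] at h
            exact List.cons_prefix_cons.mpr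
              ⟨String.ext h.1, ih xs h.2⟩
  · exact fun h => h.map _

theorem pvCondA_iff (q k : String) (segs ks : List String)
    (hmap : segs.map String.toList = pvSplitDot q.toList)
    (hk : pvSplitDot k.toList = ks.map String.toList) :
    ((q == k || PySem.Str.startswith q (k ++ ".")) = true) ↔ ks <+: segs := by
  have h1 : (q == k || PySem.Str.startswith q (k ++ ".")) = true
      ↔ (q.toList = k.toList ∨ (k.toList ++ ['.']) <+: q.toList) := by
    simp [PySem.Str.startswith_eq, PySem.Chars.startswith_iff, String.ext_iff]
  rw [h1, pvMatch_iff, hk, ← hmap, pvPrefix_map_toList]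

theorem pvTake4_iff (segs L : List String) (hL : L.length = 4) :
    ((PySem.List.slice segs none (some 4) == L) = true) ↔ L <+: segs := by
  rw [beq_iff_eq, PySem.List.slice_to segs (by norm_num)]
  constructor
  · intro h; exact h ▸ List.take_prefix _ _
  · rintro ⟨t, rfl⟩
    show List.take (Int.toNat 4) (L ++ t) = L
    exact List.take_left' hL

theorem pvGet0 {α : Type} (a : α) (t : List α) : PySem.List.pyGet? (a :: t) 0 = some a := by
  simp

theorem pvGet1 {α : Type} (a b : α) (t : List α) :
    PySem.List.pyGet? (a :: b :: t) 1 = some b := by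
  simp

theorem pvItems_eq : (PySem.Dict.ofList
    [("channels.telegram", "telegram"), ("channels.whatsapp", "whatsapp"),
     ("channels.slack", "slack"), ("channels.discord", "discord"),
     ("channels.bluebubbles", "bluebubbles"),
     ("plugins.entries.voice-call.enabled", "voice-call")] : PySem.Dict String String).items
    = [("channels.telegram", "telegram"), ("channels.whatsapp", "whatsapp"),
     ("channels.slack", "slack"), ("channels.discord", "discord"),
     ("channels.bluebubbles", "bluebubbles"),
     ("plugins.entries.voice-call.enabled", "voice-call")] := by decide

-- ===== VERDICT (by name: the statement is the Claim_ definition above) =====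
theorem config_requirement_to_capability_py_spec : Claim_equal_config_requirement_to_capability_py := by
  unfold Claim_equal_config_requirement_to_capability_py
  intro config_path _
  unfold Spec_config_requirement_to_capability_py
  unfold config_requirement_to_capability_py config_requirement_to_capability_py_alt
  simp only [pvItems_eq]
  set q := PySem.Str.lower (PySem.Str.strip config_path) with hq
  obtain ⟨segs, hs, hmap⟩ :
      ∃ L, PySem.Str.split? q "." = some L ∧ List.map String.toList L = pvSplitDot q.toList := by
    have h := PySem.Str.split?_map q "."
    cases hqs : PySem.Str.split? q "." with
    | none =>
        rw [hqs] at h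
        simp [PySem.Chars.split?] at h
    | some L =>
        rw [hqs] at h
        exact ⟨L, rfl, by simpa [PySem.Chars.split?, pvSplitOn_dot] using h⟩
  rw [hs]
  simp only [Option.getD_some]
  have hC1 := pvCondA_iff q "channels.telegram" segs ["channels", "telegram"] hmap (by decide)
  have hC2 := pvCondA_iff q "channels.whatsapp" segs ["channels", "whatsapp"] hmap (by decide)
  have hC3 := pvCondA_iff q "channels.slack" segs ["channels", "slack"] hmap (by decide)
  have hC4 := pvCondA_iff q "channels.discord" segs ["channels", "discord"] hmap (by decide)
  have hC5 := pvCondA_iff q "channels.bluebubbles" segs ["channels", "bluebubbles"] hmap (by decide)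
  have hC6 := pvCondA_iff q "plugins.entries.voice-call.enabled" segs
      ["plugins", "entries", "voice-call", "enabled"] hmap (by decide)
  have hB2 := pvTake4_iff segs ["plugins", "entries", "voice-call", "enabled"] (by decide)
  simp only [pvAScan]
  simp only [hC1, hC2, hC3, hC4, hC5, hC6, hB2]
  by_cases hch : ∃ n ∈ ["telegram", "whatsapp", "slack", "discord", "bluebubbles"],
      ["channels", n] <+: segs
  · obtain ⟨n, hn, t, hsegs⟩ := hch
    subst hsegs
    simp only [List.mem_cons, List.not_mem_nil, or_false] at hn
    rcases hn with rfl | rfl | rfl | rfl | rfl <;>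
      simp [List.cons_prefix_cons]
  · by_cases hpl : ["plugins", "entries", "voice-call", "enabled"] <+: segs
    · obtain ⟨t, hsegs⟩ := hpl
      subst hsegs
      simp [List.cons_prefix_cons]
    · have hnot : ∀ n ∈ ["telegram", "whatsapp", "slack", "discord", "bluebubbles"],
          ¬ (["channels", n] <+: segs) := fun n hn h => hch ⟨n, hn, h⟩
      simp only [List.mem_cons, List.not_mem_nil, or_false, forall_eq_or_imp, forall_eq] at hnot
      simp [hpl, hnot.1, hnot.2.1, hnot.2.2.1, hnot.2.2.2.1, hnot.2.2.2.2]
      intro h2 h0 h1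
      exfalso
      apply hch
      rcases segs with _ | ⟨x, _ | ⟨y, r⟩⟩
      · simp at h2
      · simp at h2
      · rw [pvGet0, Option.getD_some] at h0
        rw [pvGet1, Option.getD_some] at h1
        subst h0
        exact ⟨y, by simpa using h1, ⟨r, by simp⟩⟩
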